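-- pv_equiv track=rewrite | github.com/Anders-Holst/Bonsai | dataanalysis/exptest4.py | movetosaved
-- ===== SOURCE A (Python) =====
-- def movetosaved(remaining, saved, removed, dic):
--     # alla som inte tas bort av andra än removed flyttas till saved
--     changed = False
--     for (ind,pair) in reversed(list(enumerate(remaining))):
--         lst = dic[pair]
--         ok = True
--         for conds,sig in lst:
--             ok = False
--             for cond in conds:
--                 if cond in removed:
--                     ok = True
--             if not ok:
--                 break
--         if ok:
--             changed = True
--             saved.append(pair)
--             del remaining[ind]
--     return changed
-- ===== SOURCE B (Python) =====
-- def movetosaved(remaining, saved, removed, dic):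
--     # Partition-then-consolidate: one forward pass splits remaining into
--     # move/keep, then saved gets the moved pairs in reverse order (matching
--     # A's reversed-enumerate append order) and remaining is rewritten in place.
--     move, keep = [], []
--     for pair in remaining:
--         if all(any(c in removed for c in conds) for conds, sig in dic[pair]):
--             move.append(pair)
--         else:
--             keep.append(pair)
--     saved.extend(reversed(move))
--     remaining[:] = keep
--     return bool(move)
-- ===== Notes on version B (the rewrite author's own statement) =====
-- stated objective: simpler
-- what changed: Replaces the reversed-enumerate loop with in-place deletions by a single forward partition into move/keep lists, then one consolidation step (saved.extend(reversed(move)); remaining[:] = keep); returns bool(move).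
import Mathlib
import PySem

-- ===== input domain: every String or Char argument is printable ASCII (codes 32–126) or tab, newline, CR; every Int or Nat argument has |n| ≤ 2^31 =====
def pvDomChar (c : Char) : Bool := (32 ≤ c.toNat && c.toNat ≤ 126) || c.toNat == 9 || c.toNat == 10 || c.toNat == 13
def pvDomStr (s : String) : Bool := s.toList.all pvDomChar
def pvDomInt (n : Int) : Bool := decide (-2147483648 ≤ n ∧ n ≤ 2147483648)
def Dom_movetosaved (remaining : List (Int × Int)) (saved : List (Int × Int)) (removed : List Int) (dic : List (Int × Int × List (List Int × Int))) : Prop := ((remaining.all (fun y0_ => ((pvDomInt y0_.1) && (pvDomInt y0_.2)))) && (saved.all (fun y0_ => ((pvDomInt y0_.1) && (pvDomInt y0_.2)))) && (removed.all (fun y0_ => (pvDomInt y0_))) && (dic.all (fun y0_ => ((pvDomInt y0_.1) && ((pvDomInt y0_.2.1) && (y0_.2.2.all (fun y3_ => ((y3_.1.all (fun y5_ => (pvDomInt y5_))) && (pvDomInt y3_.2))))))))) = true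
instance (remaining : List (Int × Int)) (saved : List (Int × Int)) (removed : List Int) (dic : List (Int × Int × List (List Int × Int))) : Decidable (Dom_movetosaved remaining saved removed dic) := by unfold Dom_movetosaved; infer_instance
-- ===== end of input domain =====

-- B changes the decomposition (single forward partition + one consolidation step
-- instead of a reversed-enumerate loop with in-place deletions); equivalence proved
-- here is about the RETURN value only — both Pythons mutate `remaining` and `saved`
-- identically, but that is not modelled.

-- dic[pair]: first entry whose key components equal pair (none = KeyError)
def pvLookup (dic : List (Int × Int × List (List Int × Int))) (p : Int × Int) : Option (List (List Int × Int)) :=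
  match dic with
  | [] => none
  | (a, b, v) :: rest => if a = p.1 ∧ b = p.2 then some v else pvLookup rest p

-- ===== PORT A =====
-- inner 'for cond in conds: if cond in removed: ok = True' (no break)
def pvAnyIn (conds : List Int) (removed : List Int) : Bool :=
  conds.foldl (fun ok c => if removed.contains c then true else ok) false

-- 'for conds,sig in lst: ok = False; …; if not ok: break'
def pvOkLoop (lst : List (List Int × Int)) (removed : List Int) : Bool :=
  match lst with
  | [] => true
  | (conds, _) :: rest => if pvAnyIn conds removed then pvOkLoop rest removed else false

def movetosaved (remaining : List (Int × Int)) (saved : List (Int × Int)) (removed : List Int) (dic : List (Int × Int × List (List Int × Int))) : Bool :=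
  let res := (PySem.List.enumerate remaining).reverse.foldl
    (fun (st : Bool × List (Int × Int) × List (Int × Int)) ip =>
      let (changed, rem, sav) := st
      let pair := ip.2
      match pvLookup dic pair with
      | none => st   -- KeyError in Python; excluded by Pre_movetosaved
      | some lst =>
        if pvOkLoop lst removed then
          (true, rem.eraseIdx ip.1.toNat, sav ++ [pair])
        else st)
    (false, remaining, saved)
  res.1

-- ===== PORT B =====
def pvQualifies (dic : List (Int × Int × List (List Int × Int))) (removed : List Int) (p : Int × Int) : Bool :=
  match pvLookup dic p with
  | none => false   -- KeyError in Python; excluded by Pre_movetosaved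
  | some lst => lst.all (fun cs => cs.1.any (fun c => removed.contains c))

def movetosaved_alt (remaining : List (Int × Int)) (saved : List (Int × Int)) (removed : List Int) (dic : List (Int × Int × List (List Int × Int))) : Bool :=
  let move := remaining.filter (pvQualifies dic removed)
  !move.isEmpty

-- ===== PRECONDITION & SPEC =====
-- Pre_ excludes exactly the inputs where Python A raises KeyError: some pair of
-- `remaining` has no entry in `dic`.
def Pre_movetosaved (remaining : List (Int × Int)) (saved : List (Int × Int)) (removed : List Int) (dic : List (Int × Int × List (List Int × Int))) : Prop :=
  ∀ p ∈ remaining, (pvLookup dic p).isSome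
instance (remaining : List (Int × Int)) (saved : List (Int × Int)) (removed : List Int) (dic : List (Int × Int × List (List Int × Int))) : Decidable (Pre_movetosaved remaining saved removed dic) := by unfold Pre_movetosaved; infer_instance

def pvWitness_movetosaved : (List (Int × Int)) × (List (Int × Int)) × List Int × (List (Int × Int × List (List Int × Int))) :=
  ([(1, 2), (3, 4)], [(5, 6)], [7], [(1, 2, [([7], 0)]), (3, 4, [([8], 0)])])

def Spec_movetosaved (remaining : List (Int × Int)) (saved : List (Int × Int)) (removed : List Int) (dic : List (Int × Int × List (List Int × Int))) (out : Bool) : Prop := out = movetosaved_alt remaining saved removed dic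
instance (remaining : List (Int × Int)) (saved : List (Int × Int)) (removed : List Int) (dic : List (Int × Int × List (List Int × Int))) (out : Bool) : Decidable (Spec_movetosaved remaining saved removed dic out) := by unfold Spec_movetosaved; infer_instance

-- ===== CLAIM (what is proved, stated in full; the proofs are below) =====
def Claim_equal_movetosaved : Prop := ∀ (remaining : List (Int × Int)) (saved : List (Int × Int)) (removed : List Int) (dic : List (Int × Int × List (List Int × Int))), Dom_movetosaved remaining saved removed dic → Pre_movetosaved remaining saved removed dic → Spec_movetosaved remaining saved removed dic (movetosaved remaining saved removed dic)

-- ===== LEMMAS AND PROOFS =====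

theorem pvAnyIn_foldl (removed : List Int) (conds : List Int) (b : Bool) :
    conds.foldl (fun ok c => if removed.contains c then true else ok) b
      = (b || conds.any (fun c => removed.contains c)) := by
  induction conds generalizing b with
  | nil => simp
  | cons c cs ih =>
    simp only [List.foldl_cons, List.any_cons, ih]
    cases hc : removed.contains c <;>
      simp [Bool.or_left_comm]

theorem pvAnyIn_eq_any (conds removed : List Int) :
    pvAnyIn conds removed = conds.any (fun c => removed.contains c) := by
  unfold pvAnyIn
  rw [pvAnyIn_foldl]
  simp

theorem pvOkLoop_eq_all (lst : List (List Int × Int)) (removed : List Int) :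
    pvOkLoop lst removed = lst.all (fun cs => cs.1.any (fun c => removed.contains c)) := by
  induction lst with
  | nil => rfl
  | cons p rest ih =>
    obtain ⟨conds, sig⟩ := p
    show (if pvAnyIn conds removed then pvOkLoop rest removed else false)
        = ((conds.any fun c => removed.contains c) && rest.all _)
    rw [pvAnyIn_eq_any]
    cases h : conds.any (fun c => removed.contains c)
    · simp
    · rw [if_pos rfl, Bool.true_and]
      exact ih

-- the first component of A's fold depends only on whether some item qualifies
theorem foldA_fst (l : List (Int × (Int × Int))) (removed : List Int)
    (dic : List (Int × Int × List (List Int × Int))) (st : Bool × List (Int × Int) × List (Int × Int)) :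
    (l.foldl
      (fun (st : Bool × List (Int × Int) × List (Int × Int)) ip =>
        let (changed, rem, sav) := st
        let pair := ip.2
        match pvLookup dic pair with
        | none => st
        | some lst =>
          if pvOkLoop lst removed then
            (true, rem.eraseIdx ip.1.toNat, sav ++ [pair])
          else st)
      st).1
    = (st.1 || l.any (fun ip => pvQualifies dic removed ip.2)) := by
  induction l generalizing st with
  | nil => simp
  | cons ip rest ih =>
    obtain ⟨changed, rem, sav⟩ := st
    simp only [List.foldl_cons, List.any_cons]
    cases h : pvLookup dic ip.2 with
    | none =>
      have hq : pvQualifies dic removed ip.2 = false := by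
        unfold pvQualifies; rw [h]
      rw [hq]
      simp only [ih]
      simp
    | some lst =>
      have hq : pvQualifies dic removed ip.2 = pvOkLoop lst removed := by
        unfold pvQualifies; rw [h, pvOkLoop_eq_all]
      rw [hq]
      cases hok : pvOkLoop lst removed
      · simp only [hok, ih]
        simp
      · simp only [hok, ih]
        simp

theorem pv_not_isEmpty_filter {α : Type} (p : α → Bool) (l : List α) :
    (!(l.filter p).isEmpty) = l.any p := by
  induction l with
  | nil => rfl
  | cons a l ih => cases ha : p a <;> simp [ha, ih]

theorem movetosaved_spec : Claim_equal_movetosaved := by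
  intro remaining saved removed dic _ _
  unfold Spec_movetosaved movetosaved movetosaved_alt
  simp only [foldA_fst, Bool.false_or, List.any_reverse]
  rw [show (fun ip : Int × (Int × Int) => pvQualifies dic removed ip.2)
        = ((fun p => pvQualifies dic removed p) ∘ Prod.snd) from rfl,
      ← List.any_map, PySem.List.map_snd_enumerate]
  exact (pv_not_isEmpty_filter (pvQualifies dic removed) remaining).symm
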